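-- pv_equiv track=rewrite | github.com/skrewbar/PS | Baekjoon/gold/12851.py | bfs
-- ===== SOURCE A (Python) =====
-- from collections import deque
--
-- def bfs(start: int, end: int) -> int:
--     min_second, ways = 0, 0
--     second = [0 for i in range(10_0001)]
--     queue = deque([start])
--     while queue:
--         current = queue.popleft()
--         if current == end:
--             min_second = second[current]
--             ways += 1
--             continue
--
--         for nxt in [current + 1, current - 1, current * 2]:
--             if 0 <= nxt < 10_0001:
--                 if second[nxt] == 0 or second[nxt] == second[current] + 1:
--                     second[nxt] = second[current] + 1
--                     queue.append(nxt)
--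
--     return [min_second, ways]
-- ===== SOURCE B (Python) =====
-- def bfs(start: int, end: int) -> int:
--     N = 10_0001
--     second = [0] * N
--     min_second, ways = 0, 0
--     level = 0
--     frontier = [start]
--     while frontier:
--         nxt_frontier = []
--         for node in frontier:
--             if node == end:
--                 min_second = level
--                 ways += 1
--                 continue
--             for nb in (node + 1, node - 1, node * 2):
--                 if 0 <= nb < N and (second[nb] == 0 or second[nb] == level + 1):
--                     second[nb] = level + 1
--                     nxt_frontier.append(nb)
--         frontier = nxt_frontier
--         level += 1
--     return [min_second, ways]
-- ===== Notes on version B (the rewrite author's own statement) =====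
-- stated objective: alternative
-- what changed: A's FIFO deque (each popped node re-reading its stored distance from second[]) is replaced by a level-synchronous BFS: the frontier is swept level by level into a fresh next-frontier list, with an explicit level counter supplying the distance, so per-node distances are never read back for the result.
-- crash fix: A raises IndexError when start = 100001 (its expansion reads second[100001]) or when start == end lies outside [-100001, 100000] (the first pop reads second[start] out of wrap range); B returns normally there, e.g. [0, 1] whenever start == end. — e.g. on bfs(100001, 100001): A raises IndexError, B returns [0, 1]
import Mathlib
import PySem

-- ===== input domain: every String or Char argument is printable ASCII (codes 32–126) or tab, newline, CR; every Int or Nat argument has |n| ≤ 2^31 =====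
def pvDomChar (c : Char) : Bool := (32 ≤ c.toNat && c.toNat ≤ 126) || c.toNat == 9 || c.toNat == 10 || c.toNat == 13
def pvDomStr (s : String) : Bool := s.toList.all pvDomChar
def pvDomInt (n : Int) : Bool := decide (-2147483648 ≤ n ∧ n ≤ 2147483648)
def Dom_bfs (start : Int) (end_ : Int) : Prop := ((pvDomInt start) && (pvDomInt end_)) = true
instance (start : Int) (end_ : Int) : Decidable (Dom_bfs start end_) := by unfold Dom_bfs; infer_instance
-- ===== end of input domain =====

-- B replaces A's FIFO deque (whose per-node distance must be stored in and re-read from second[])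
-- by a level-synchronous two-list frontier sweep with an explicit level counter; same cost
-- ("alternative"); equivalence of return values is proved on Pre_, which excludes exactly the
-- inputs on which A raises IndexError.

-- shared primitive wrapper: Python's `second[i]` read, with Python's negative-index wrap.
-- Where Python raises IndexError (i outside [-len, len)) this returns 0; Pre_ excludes every
-- input on which A performs such a read, so the default is never the value of a claim.
def secRead (sec : Array Int) (i : Int) : Int :=
  if 0 ≤ i ∧ i < (sec.size : Int) then sec.getD i.toNat 0
  else if -(sec.size : Int) ≤ i ∧ i < 0 then sec.getD ((sec.size : Int) + i).toNat 0
  else 0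

def pvFuel : Nat := 2 ^ 64

-- ===== PORT A =====
-- inner `for nxt in [current+1, current-1, current*2]` body: state = (queue back, second);
-- `second[nxt] = …` is `setIfInBounds` (the 0 ≤ nxt < 100001 guard holds, so it is exact)
def aVisit (current : Int) (st : List Int × Array Int) (nxt : Int) : List Int × Array Int :=
  if 0 ≤ nxt ∧ nxt < 100001 then
    if secRead st.2 nxt = 0 ∨ secRead st.2 nxt = secRead st.2 current + 1 then
      (nxt :: st.1, st.2.setIfInBounds nxt.toNat (secRead st.2 current + 1))
    else st
  else st

-- the `while queue:` loop. The deque is ported as a banker's queue: popleft takes from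
-- `front`, append conses onto `back`, and when `front` runs out `back.reverse` restores
-- FIFO order. Fuel only makes the recursion total, one unit per popleft.
def aLoop (end_ : Int) : Nat → List Int → List Int → Int → Int → Array Int → List Int
  | 0, _, _, ms, ways, _ => [ms, ways]
  | _ + 1, [], [], ms, ways, _ => [ms, ways]
  | f + 1, [], b :: bk, ms, ways, sec =>
    match (b :: bk).reverse with
    | [] => [ms, ways]          -- unreachable: the reverse of a nonempty list is nonempty
    | current :: front =>
      if current = end_ then
        aLoop end_ f front [] (secRead sec current) (ways + 1) sec
      else
        let st := [current + 1, current - 1, current * 2].foldl (aVisit current) ([], sec)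
        aLoop end_ f front st.1 ms ways st.2
  | f + 1, current :: front, back, ms, ways, sec =>
    if current = end_ then
      aLoop end_ f front back (secRead sec current) (ways + 1) sec
    else
      let st := [current + 1, current - 1, current * 2].foldl (aVisit current) (back, sec)
      aLoop end_ f front st.1 ms ways st.2

def bfs (start : Int) (end_ : Int) : List Int :=
  aLoop end_ pvFuel [start] [] 0 0 (Array.replicate 100001 0)

-- ===== PORT B =====
-- inner `for nb in (node+1, node-1, node*2)` body: state = (nxt_frontier, second);
-- `nxt_frontier.append` conses (the list is reversed back into order at the level switch)
def bVisit (level : Int) (st : List Int × Array Int) (nb : Int) : List Int × Array Int :=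
  if 0 ≤ nb ∧ nb < 100001 then
    if secRead st.2 nb = 0 ∨ secRead st.2 nb = level + 1 then
      (nb :: st.1, st.2.setIfInBounds nb.toNat (level + 1))
    else st
  else st

-- body of `for node in frontier:` — returns (min_second, ways, nxt_frontier, second)
def bNode (end_ level node ms ways : Int) (nxtRev : List Int) (sec : Array Int) :
    Int × Int × List Int × Array Int :=
  if node = end_ then (level, ways + 1, nxtRev, sec)
  else
    let st := [node + 1, node - 1, node * 2].foldl (bVisit level) (nxtRev, sec)
    (ms, ways, st.1, st.2)

-- the `while frontier:` loop with its inner `for` as one worklist recursion; when the current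
-- level is exhausted the accumulated next frontier is reversed into iteration order and the
-- level counter advances. Fuel only makes the recursion total, one unit per processed node.
def bLoop (end_ : Int) : Nat → List Int → List Int → Int → Int → Int → Array Int → List Int
  | 0, _, _, ms, ways, _, _ => [ms, ways]
  | _ + 1, [], [], ms, ways, _, _ => [ms, ways]
  | f + 1, [], n :: nxRev, ms, ways, level, sec =>
    match (n :: nxRev).reverse with
    | [] => [ms, ways]          -- unreachable: the reverse of a nonempty list is nonempty
    | node :: cur =>
      let r := bNode end_ (level + 1) node ms ways [] sec
      bLoop end_ f cur r.2.2.1 r.1 r.2.1 (level + 1) r.2.2.2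
  | f + 1, node :: cur, nxtRev, ms, ways, level, sec =>
    let r := bNode end_ level node ms ways nxtRev sec
    bLoop end_ f cur r.2.2.1 r.1 r.2.1 level r.2.2.2

def bfs_alt (start : Int) (end_ : Int) : List Int :=
  bLoop end_ pvFuel [start] [] 0 0 0 (Array.replicate 100001 0)

-- ===== PRECONDITION & SPEC =====
-- Pre_ excludes exactly the inputs on which A raises IndexError (start = 100001, whose expansion
-- reads second[100001]; or start == end outside the list's wrap range [-100001, 100000], read on
-- the first pop). A returns normally on every other input, and all of those are kept.
def Pre_bfs (start : Int) (end_ : Int) : Prop :=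
  start ≠ 100001 ∧ (start = end_ → (-100001 ≤ start ∧ start ≤ 100000))
instance (start : Int) (end_ : Int) : Decidable (Pre_bfs start end_) := by unfold Pre_bfs; infer_instance
def pvWitness_bfs : Int × Int := (5, 17)

-- A raises IndexError when start = 100001, or when start = end lies outside [-100001, 100000];
-- B returns normally there ([0, 1] whenever start = end).
def Raises_bfs (start : Int) (end_ : Int) : Prop :=
  start = 100001 ∨ (start = end_ ∧ (start < -100001 ∨ 100000 < start))
instance (start : Int) (end_ : Int) : Decidable (Raises_bfs start end_) := by unfold Raises_bfs; infer_instance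
def pvRaiseWitness_bfs : Int × Int := (100001, 100001)
def pvRaiseWitnessOut_bfs : List Int := [0, 1]

def Spec_bfs (start : Int) (end_ : Int) (out : List Int) : Prop := out = bfs_alt start end_
instance (start : Int) (end_ : Int) (out : List Int) : Decidable (Spec_bfs start end_ out) := by unfold Spec_bfs; infer_instance

-- ===== CLAIM (what is proved, stated in full; the proofs are below) =====
def Claim_equal_bfs : Prop := ∀ (start : Int) (end_ : Int), Dom_bfs start end_ → Pre_bfs start end_ → Spec_bfs start end_ (bfs start end_)

def Claim_raises_bfs : Prop :=
  (∀ (start : Int) (end_ : Int), Dom_bfs start end_ → Raises_bfs start end_ → ¬ Pre_bfs start end_) ∧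
  (Dom_bfs (pvRaiseWitness_bfs.1) (pvRaiseWitness_bfs.2) ∧ Raises_bfs (pvRaiseWitness_bfs.1) (pvRaiseWitness_bfs.2) ∧ bfs_alt (pvRaiseWitness_bfs.1) (pvRaiseWitness_bfs.2) = pvRaiseWitnessOut_bfs)

-- ===== LEMMAS AND PROOFS =====

lemma secRead_replicate (n : Nat) (i : Int) : secRead (Array.replicate n 0) i = 0 := by
  unfold secRead
  split_ifs <;> simp [Array.getD]

lemma secRead_get (sec : Array Int) (i : Int) (h0 : 0 ≤ i) (h1 : i < (sec.size : Int))
    (hn : i.toNat < sec.size) : secRead sec i = sec[i.toNat] := by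
  unfold secRead
  rw [if_pos ⟨h0, h1⟩]
  simp [Array.getD, hn]

lemma secRead_set (sec : Array Int) (nb v x : Int)
    (hnb0 : 0 ≤ nb) (hnb1 : nb < (sec.size : Int)) (hx0 : 0 ≤ x) (hx1 : x < (sec.size : Int)) :
    secRead (sec.setIfInBounds nb.toNat v) x = if x = nb then v else secRead sec x := by
  have hxn : x.toNat < sec.size := by omega
  have hxn' : x.toNat < (sec.setIfInBounds nb.toNat v).size := by
    rw [Array.size_setIfInBounds]; exact hxn
  rw [secRead_get _ x hx0 (by rw [Array.size_setIfInBounds]; exact hx1) hxn',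
      secRead_get sec x hx0 hx1 hxn]
  rw [Array.getElem_setIfInBounds hxn]
  by_cases h : x = nb
  · simp [h]
  · have : nb.toNat ≠ x.toNat := by omega
    simp [h, this]

lemma bVisit_len (level : Int) (st : List Int × Array Int) (nb : Int) :
    (bVisit level st nb).2.size = st.2.size := by
  unfold bVisit
  split_ifs
  · exact Array.size_setIfInBounds
  · rfl
  · rfl

-- single bVisit step: effect on second[] at an in-range point
lemma bVisit_sec (level : Int) (st : List Int × Array Int) (nb x : Int)
    (hlen : st.2.size = 100001) (hx0 : 0 ≤ x) (hx1 : x < 100001) :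
    secRead (bVisit level st nb).2 x = secRead st.2 x ∨
      ((secRead st.2 x = 0 ∨ secRead st.2 x = level + 1) ∧
        secRead (bVisit level st nb).2 x = level + 1) := by
  unfold bVisit
  split_ifs with h1 h2
  · rcases h1 with ⟨ha, hb⟩
    rw [secRead_set st.2 nb (level + 1) x ha (by omega) hx0 (by omega)]
    by_cases h : x = nb
    · right
      subst h
      simp_all
    · left; simp [h]
  · left; rfl
  · left; rfl

lemma bVisit_sec_ne (level : Int) (st : List Int × Array Int) (nb x : Int)
    (hlen : st.2.size = 100001) (hx0 : 0 ≤ x) (hx1 : x < 100001) (hne : x ≠ nb) :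
    secRead (bVisit level st nb).2 x = secRead st.2 x := by
  unfold bVisit
  split_ifs with h1 h2
  · rcases h1 with ⟨ha, hb⟩
    rw [secRead_set st.2 nb (level + 1) x ha (by omega) hx0 (by omega)]
    simp [hne]
  · rfl
  · rfl

-- single bVisit step: effect on the accumulated next frontier
lemma bVisit_queue (level : Int) (st : List Int × Array Int) (nb : Int)
    (hlen : st.2.size = 100001) :
    (bVisit level st nb).1 = st.1 ∨
      ((bVisit level st nb).1 = nb :: st.1 ∧ 0 ≤ nb ∧ nb < 100001 ∧
        secRead (bVisit level st nb).2 nb = level + 1) := by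
  unfold bVisit
  split_ifs with h1 h2
  · rcases h1 with ⟨ha, hb⟩
    right
    refine ⟨rfl, ha, hb, ?_⟩
    rw [secRead_set st.2 nb (level + 1) nb ha (by omega) ha (by omega)]
    simp
  · left; rfl
  · left; rfl

-- aVisit is bVisit once second[current] = level
lemma visit_eq (level c nb : Int) (st : List Int × Array Int) (h : secRead st.2 c = level) :
    aVisit c st nb = bVisit level st nb := by
  unfold aVisit bVisit
  rw [h]

-- the three-neighbour folds agree (writes at current±1 cannot change second[current])
lemma fold_eq (level c : Int) (q : List Int) (s : Array Int) (hlen : s.size = 100001)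
    (hc0 : 0 ≤ c) (hc1 : c < 100001) (hc : secRead s c = level) :
    List.foldl (aVisit c) (q, s) [c + 1, c - 1, c * 2] =
      List.foldl (bVisit level) (q, s) [c + 1, c - 1, c * 2] := by
  have h1 : secRead (bVisit level (q, s) (c + 1)).2 c = level := by
    rw [bVisit_sec_ne level (q, s) (c + 1) c hlen hc0 hc1 (by omega)]
    exact hc
  have hlen1 : (bVisit level (q, s) (c + 1)).2.size = 100001 := by
    rw [bVisit_len]; exact hlen
  have h2 : secRead (bVisit level (bVisit level (q, s) (c + 1)) (c - 1)).2 c = level := by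
    rw [bVisit_sec_ne level _ (c - 1) c hlen1 hc0 hc1 (by omega)]
    exact h1
  simp only [List.foldl_cons, List.foldl_nil]
  rw [visit_eq level c (c + 1) (q, s) hc]
  rw [visit_eq level c (c - 1) _ h1]
  rw [visit_eq level c (c * 2) _ h2]

-- fold invariants over an arbitrary neighbour list
lemma foldB_inv (level : Int) : ∀ (L : List Int) (st : List Int × Array Int),
    st.2.size = 100001 →
    ((List.foldl (bVisit level) st L).2.size = 100001 ∧
     (∀ x, 0 ≤ x → x < 100001 → secRead st.2 x = level + 1 →
        secRead (List.foldl (bVisit level) st L).2 x = level + 1) ∧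
     (∀ x, 0 ≤ x → x < 100001 → 0 < level → secRead st.2 x = level →
        secRead (List.foldl (bVisit level) st L).2 x = level) ∧
     (∀ v, v ∈ (List.foldl (bVisit level) st L).1 → v ∈ st.1 ∨
        (0 ≤ v ∧ v < 100001 ∧ secRead (List.foldl (bVisit level) st L).2 v = level + 1))) := by
  intro L
  induction L with
  | nil => intro st hlen; exact ⟨hlen, fun x _ _ h => h, fun x _ _ _ h => h, fun v hv => Or.inl hv⟩
  | cons nb L ih =>
    intro st hlen
    simp only [List.foldl_cons]
    have hlen' : (bVisit level st nb).2.size = 100001 := by rw [bVisit_len]; exact hlen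
    obtain ⟨ih1, ih2, ih3, ih4⟩ := ih (bVisit level st nb) hlen'
    refine ⟨ih1, ?_, ?_, ?_⟩
    · intro x hx0 hx1 hx
      apply ih2 x hx0 hx1
      rcases bVisit_sec level st nb x hlen hx0 hx1 with h | ⟨_, h⟩ <;> rw [h]
      exact hx
    · intro x hx0 hx1 hpos hx
      apply ih3 x hx0 hx1 hpos
      rcases bVisit_sec level st nb x hlen hx0 hx1 with h | ⟨hcond, h⟩
      · rw [h]; exact hx
      · exfalso; omega
    · intro v hv
      rcases ih4 v hv with hv' | hgood
      · rcases bVisit_queue level st nb hlen with hq | ⟨hq, hnb0, hnb1, hsec⟩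
        · left; rw [hq] at hv'; exact hv'
        · rw [hq] at hv'
          rcases List.mem_cons.1 hv' with h | h
          · right
            subst h
            exact ⟨hnb0, hnb1, ih2 v hnb0 hnb1 hsec⟩
          · left; exact h
      · right; exact hgood

-- step equations for the two loops (read off the structural recursion)
lemma aLoop_nil (end_ : Int) (f : Nat) (ms ways : Int) (sec : Array Int) :
    aLoop end_ f [] [] ms ways sec = [ms, ways] := by
  cases f <;> rfl

lemma bLoop_nil (end_ : Int) (f : Nat) (ms ways level : Int) (sec : Array Int) :
    bLoop end_ f [] [] ms ways level sec = [ms, ways] := by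
  cases f <;> rfl

lemma aLoop_cons (end_ : Int) (f : Nat) (c : Int) (front back : List Int) (ms ways : Int)
    (sec : Array Int) :
    aLoop end_ (f + 1) (c :: front) back ms ways sec =
      if c = end_ then aLoop end_ f front back (secRead sec c) (ways + 1) sec
      else
        let st := [c + 1, c - 1, c * 2].foldl (aVisit c) (back, sec)
        aLoop end_ f front st.1 ms ways st.2 := rfl

lemma bLoop_cons (end_ : Int) (f : Nat) (c : Int) (cur nxtRev : List Int) (ms ways level : Int)
    (sec : Array Int) :
    bLoop end_ (f + 1) (c :: cur) nxtRev ms ways level sec =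
      bLoop end_ f cur (bNode end_ level c ms ways nxtRev sec).2.2.1
        (bNode end_ level c ms ways nxtRev sec).1 (bNode end_ level c ms ways nxtRev sec).2.1
        level (bNode end_ level c ms ways nxtRev sec).2.2.2 := rfl

lemma aLoop_flip (end_ : Int) (f : Nat) (b : Int) (bk : List Int) (ms ways : Int)
    (sec : Array Int) (c : Int) (front : List Int) (h : (b :: bk).reverse = c :: front) :
    aLoop end_ (f + 1) [] (b :: bk) ms ways sec =
      if c = end_ then aLoop end_ f front [] (secRead sec c) (ways + 1) sec
      else
        let st := [c + 1, c - 1, c * 2].foldl (aVisit c) ([], sec)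
        aLoop end_ f front st.1 ms ways st.2 := by
  conv_lhs => rw [aLoop, h]

lemma bLoop_flip (end_ : Int) (f : Nat) (n : Int) (nxRev : List Int) (ms ways level : Int)
    (sec : Array Int) (c : Int) (cur : List Int) (h : (n :: nxRev).reverse = c :: cur) :
    bLoop end_ (f + 1) [] (n :: nxRev) ms ways level sec =
      bLoop end_ f cur (bNode end_ (level + 1) c ms ways [] sec).2.2.1
        (bNode end_ (level + 1) c ms ways [] sec).1 (bNode end_ (level + 1) c ms ways [] sec).2.1
        (level + 1) (bNode end_ (level + 1) c ms ways [] sec).2.2.2 := by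
  conv_lhs => rw [bLoop, h]

lemma bNode_end (end_ level c ms ways : Int) (nxtRev : List Int) (sec : Array Int)
    (h : c = end_) : bNode end_ level c ms ways nxtRev sec = (level, ways + 1, nxtRev, sec) := by
  unfold bNode; rw [if_pos h]

lemma bNode_ne (end_ level c ms ways : Int) (nxtRev : List Int) (sec : Array Int)
    (h : ¬ c = end_) :
    bNode end_ level c ms ways nxtRev sec =
      (ms, ways, ([c + 1, c - 1, c * 2].foldl (bVisit level) (nxtRev, sec)).1,
        ([c + 1, c - 1, c * 2].foldl (bVisit level) (nxtRev, sec)).2) := by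
  unfold bNode; rw [if_neg h]

lemma visit_oob (level c : Int) (st : List Int × Array Int) (nb : Int)
    (h : ¬ (0 ≤ nb ∧ nb < 100001)) :
    aVisit c st nb = st ∧ bVisit level st nb = st := by
  unfold aVisit bVisit; rw [if_neg h, if_neg h]; exact ⟨rfl, rfl⟩

-- the lockstep simulation: A's banker's queue flips exactly at the level boundaries, so its
-- (front, back) is always B's (current frontier remainder, accumulated next frontier)
lemma sim (end_ : Int) : ∀ (f : Nat) (level ms ways : Int) (sec : Array Int)
    (cur nxtRev : List Int),
    sec.size = 100001 → 0 ≤ level →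
    (∀ v ∈ cur, 0 ≤ v ∧ v < 100001 ∧ secRead sec v = level) →
    (∀ v ∈ nxtRev, 0 ≤ v ∧ v < 100001 ∧ secRead sec v = level + 1) →
    (level = 0 → cur.length ≤ 1) →
    aLoop end_ f cur nxtRev ms ways sec = bLoop end_ f cur nxtRev ms ways level sec := by
  intro f
  induction f with
  | zero => intros; rfl
  | succ f ih =>
    -- one shared step: popping node c at `level` with `rest` still pending and `nxtRev` queued
    have hbody : ∀ (level ms ways : Int) (sec : Array Int) (c : Int) (rest nxtRev : List Int),
        sec.size = 100001 → 0 ≤ level →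
        (0 ≤ c ∧ c < 100001 ∧ secRead sec c = level) →
        (∀ v ∈ rest, 0 ≤ v ∧ v < 100001 ∧ secRead sec v = level) →
        (∀ v ∈ nxtRev, 0 ≤ v ∧ v < 100001 ∧ secRead sec v = level + 1) →
        (level = 0 → rest = []) →
        (if c = end_ then aLoop end_ f rest nxtRev (secRead sec c) (ways + 1) sec
         else
           let st := [c + 1, c - 1, c * 2].foldl (aVisit c) (nxtRev, sec)
           aLoop end_ f rest st.1 ms ways st.2) =
          bLoop end_ f rest (bNode end_ level c ms ways nxtRev sec).2.2.1
            (bNode end_ level c ms ways nxtRev sec).1 (bNode end_ level c ms ways nxtRev sec).2.1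
            level (bNode end_ level c ms ways nxtRev sec).2.2.2 := by
      intro level ms ways sec c rest nxtRev hlen hlvl ⟨hc0, hc1, hc⟩ hrest hnxt h0
      by_cases hce : c = end_
      · rw [if_pos hce, bNode_end end_ level c ms ways nxtRev sec hce, hc]
        exact ih level level (ways + 1) sec rest nxtRev hlen hlvl hrest hnxt
          (fun hl => by rw [h0 hl]; simp)
      · rw [if_neg hce, bNode_ne end_ level c ms ways nxtRev sec hce]
        simp only
        rw [fold_eq level c nxtRev sec hlen hc0 hc1 hc]
        obtain ⟨p1, p2, p3, p4⟩ := foldB_inv level [c + 1, c - 1, c * 2] (nxtRev, sec) hlen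
        apply ih level ms ways _ rest _ p1 hlvl
        · intro v hv
          obtain ⟨hv0, hv1, hvsec⟩ := hrest v hv
          refine ⟨hv0, hv1, ?_⟩
          by_cases hl : level = 0
          · rw [h0 hl] at hv; simp at hv
          · exact p3 v hv0 hv1 (by omega) hvsec
        · intro v hv
          rcases p4 v hv with h | h
          · obtain ⟨hv0, hv1, hvsec⟩ := hnxt v h
            exact ⟨hv0, hv1, p2 v hv0 hv1 hvsec⟩
          · exact h
        · intro hl
          rw [h0 hl]; simp
    intro level ms ways sec cur nxtRev hlen hlvl hcur hnxt h0
    cases cur with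
    | cons c rest =>
      have hc := hcur c (by simp)
      have hrest : ∀ v ∈ rest, 0 ≤ v ∧ v < 100001 ∧ secRead sec v = level :=
        fun v hv => hcur v (by simp [hv])
      have h0' : level = 0 → rest = [] := by
        intro hl
        have h := h0 hl
        rw [List.length_cons] at h
        have hz : rest.length = 0 := by omega
        exact List.eq_nil_of_length_eq_zero hz
      rw [aLoop_cons, bLoop_cons]
      exact hbody level ms ways sec c rest nxtRev hlen hlvl hc hrest hnxt h0'
    | nil =>
      cases nxtRev with
      | nil => rfl
      | cons n nx =>
        rcases hrev : (n :: nx).reverse with _ | ⟨c, cur'⟩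
        · exact absurd (List.reverse_eq_nil_iff.mp hrev) (by simp)
        · have hmem : ∀ v ∈ c :: cur', 0 ≤ v ∧ v < 100001 ∧ secRead sec v = level + 1 := by
            intro v hv
            exact hnxt v (List.mem_reverse.mp (hrev ▸ hv))
          rw [aLoop_flip end_ f n nx ms ways sec c cur' hrev,
              bLoop_flip end_ f n nx ms ways level sec c cur' hrev]
          exact hbody (level + 1) ms ways sec c cur' [] hlen (by omega)
            (hmem c (by simp))
            (fun v hv => hmem v (by simp [hv]))
            (by intro v hv; simp at hv)
            (by omega)

-- the start = -1 case of the main theorem, generalized over the all-zero board so that no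
-- kernel-side evaluation of the 100001-element literal is ever needed
lemma simNegOne (end_ : Int) (sec0 : Array Int) (hsize : sec0.size = 100001)
    (hzero : ∀ i, secRead sec0 i = 0) :
    aLoop end_ (pvFuel - 1) []
      (List.foldl (aVisit (-1)) (([] : List Int), sec0) [0, -2, -2]).1 0 0
      (List.foldl (aVisit (-1)) (([] : List Int), sec0) [0, -2, -2]).2 =
    bLoop end_ (pvFuel - 1) []
      (List.foldl (bVisit 0) (([] : List Int), sec0) [0, -2, -2]).1 0 0 0
      (List.foldl (bVisit 0) (([] : List Int), sec0) [0, -2, -2]).2 := by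
  have goob : ¬ ((0 : Int) ≤ -2 ∧ (-2 : Int) < 100001) := by omega
  have c1 : (0 : Int) ≤ 0 ∧ (0 : Int) < 100001 := by omega
  have hs0 : secRead sec0 0 = 0 := hzero 0
  have hsm1 : secRead sec0 (-1) = 0 := hzero (-1)
  have e1 : aVisit (-1) (([] : List Int), sec0) 0
      = ((0 : Int) :: [], sec0.setIfInBounds (0 : Int).toNat (0 + 1)) := by
    unfold aVisit
    rw [if_pos c1]
    rw [show ((([] : List Int), sec0).2) = sec0 from rfl]
    rw [hs0, hsm1, if_pos (by norm_num : (0 : Int) = 0 ∨ (0 : Int) = 0 + 1)]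
  have e1b : bVisit 0 (([] : List Int), sec0) 0
      = ((0 : Int) :: [], sec0.setIfInBounds (0 : Int).toNat (0 + 1)) := by
    unfold bVisit
    rw [if_pos c1]
    rw [show ((([] : List Int), sec0).2) = sec0 from rfl]
    rw [hs0, if_pos (by norm_num : (0 : Int) = 0 ∨ (0 : Int) = 0 + 1)]
  have hfa : List.foldl (aVisit (-1)) (([] : List Int), sec0) [0, -2, -2]
      = ((0 : Int) :: [], sec0.setIfInBounds (0 : Int).toNat (0 + 1)) := by
    simp only [List.foldl_cons, List.foldl_nil]
    rw [e1, (visit_oob 0 (-1) _ (-2) goob).1, (visit_oob 0 (-1) _ (-2) goob).1]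
  have hfb : List.foldl (bVisit 0) (([] : List Int), sec0) [0, -2, -2]
      = ((0 : Int) :: [], sec0.setIfInBounds (0 : Int).toNat (0 + 1)) := by
    simp only [List.foldl_cons, List.foldl_nil]
    rw [e1b, (visit_oob 0 0 _ (-2) goob).2, (visit_oob 0 0 _ (-2) goob).2]
  have hfa1 : (List.foldl (aVisit (-1)) (([] : List Int), sec0) [0, -2, -2]).1
      = (0 : Int) :: [] := by rw [hfa]
  have hfa2 : (List.foldl (aVisit (-1)) (([] : List Int), sec0) [0, -2, -2]).2
      = sec0.setIfInBounds (0 : Int).toNat (0 + 1) := by rw [hfa]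
  have hfb1 : (List.foldl (bVisit 0) (([] : List Int), sec0) [0, -2, -2]).1
      = (0 : Int) :: [] := by rw [hfb]
  have hfb2 : (List.foldl (bVisit 0) (([] : List Int), sec0) [0, -2, -2]).2
      = sec0.setIfInBounds (0 : Int).toNat (0 + 1) := by rw [hfb]
  rw [hfa1, hfa2, hfb1, hfb2]
  have hlen1 : (sec0.setIfInBounds (0 : Int).toNat (0 + 1)).size = 100001 := by
    rw [Array.size_setIfInBounds]; exact hsize
  have hread : secRead (sec0.setIfInBounds (0 : Int).toNat (0 + 1)) 0 = 0 + 1 := by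
    rw [secRead_set sec0 0 (0 + 1) 0 le_rfl (by rw [hsize]; omega) le_rfl (by rw [hsize]; omega)]
    rw [if_pos rfl]
  have h := sim end_ (pvFuel - 1) 0 0 0 (sec0.setIfInBounds (0 : Int).toNat (0 + 1)) []
    ((0 : Int) :: []) hlen1 le_rfl
    (by intro v hv; exact absurd hv (List.not_mem_nil))
    (by intro v hv
        rw [List.mem_singleton] at hv
        subst hv
        exact ⟨le_rfl, by omega, hread⟩)
    (fun _ => Nat.zero_le 1)
  exact h

-- ===== VERDICT (by name: the statement is the Claim_ definition above) =====
theorem bfs_spec : Claim_equal_bfs := by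
  unfold Claim_equal_bfs Spec_bfs Pre_bfs
  intro start end_ _ hp
  obtain ⟨hne1, heq⟩ := hp
  unfold bfs bfs_alt
  have hlen : (Array.replicate 100001 (0 : Int)).size = 100001 := Array.size_replicate
  by_cases hin : 0 ≤ start ∧ start ≤ 100000
  · -- in-range start: pure simulation from the initial state
    exact sim end_ pvFuel 0 0 0 (Array.replicate 100001 0) [start] [] hlen le_rfl
      (by intro v hv
          rw [List.mem_singleton] at hv
          subst hv
          exact ⟨hin.1, by omega, secRead_replicate _ _⟩)
      (by intro v hv; exact absurd hv (List.not_mem_nil))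
      (fun _ => List.length_singleton.le)
  · -- out-of-range start: unfold the single first pop on both sides
    have hsucc : pvFuel = (pvFuel - 1) + 1 := by norm_num [pvFuel]
    rw [hsucc]
    rw [aLoop_cons, bLoop_cons]
    by_cases hse : start = end_
    · -- start = end (and -100001 ≤ start ≤ -1 by Pre_): both stop with [0, 1]
      rw [if_pos hse, secRead_replicate, aLoop_nil,
          bNode_end end_ 0 start 0 0 [] _ hse]
      exact (bLoop_nil end_ (pvFuel - 1) 0 (0 + 1) 0 (Array.replicate 100001 0)).symm
    · rw [if_neg hse, bNode_ne end_ 0 start 0 0 [] _ hse]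
      simp only
      by_cases hm1 : start = -1
      · -- start = -1: the only in-range neighbour is 0; afterwards pure simulation
        subst hm1
        rw [show ([(-1 : Int) + 1, (-1 : Int) - 1, (-1 : Int) * 2] : List Int)
            = [0, -2, -2] from by norm_num]
        exact simNegOne end_ (Array.replicate 100001 0) hlen
          (fun i => secRead_replicate _ _)
      · -- any other out-of-range start has no in-range neighbour: both return [0, 0]
        have g1 : ¬ ((0 : Int) ≤ start + 1 ∧ start + 1 < 100001) := by omega
        have g2 : ¬ ((0 : Int) ≤ start - 1 ∧ start - 1 < 100001) := by omega
        have g3 : ¬ ((0 : Int) ≤ start * 2 ∧ start * 2 < 100001) := by omega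
        have hfa : List.foldl (aVisit start) (([] : List Int), Array.replicate 100001 0)
            [start + 1, start - 1, start * 2]
            = (([] : List Int), Array.replicate 100001 0) := by
          simp only [List.foldl_cons, List.foldl_nil]
          rw [(visit_oob 0 start _ _ g1).1, (visit_oob 0 start _ _ g2).1,
            (visit_oob 0 start _ _ g3).1]
        have hfb : List.foldl (bVisit 0) (([] : List Int), Array.replicate 100001 0)
            [start + 1, start - 1, start * 2]
            = (([] : List Int), Array.replicate 100001 0) := by
          simp only [List.foldl_cons, List.foldl_nil]
          rw [(visit_oob 0 start _ _ g1).2, (visit_oob 0 start _ _ g2).2,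
            (visit_oob 0 start _ _ g3).2]
        have hfa1 : (List.foldl (aVisit start) (([] : List Int), Array.replicate 100001 0)
            [start + 1, start - 1, start * 2]).1 = ([] : List Int) := by rw [hfa]
        have hfa2 : (List.foldl (aVisit start) (([] : List Int), Array.replicate 100001 0)
            [start + 1, start - 1, start * 2]).2 = Array.replicate 100001 0 := by rw [hfa]
        have hfb1 : (List.foldl (bVisit 0) (([] : List Int), Array.replicate 100001 0)
            [start + 1, start - 1, start * 2]).1 = ([] : List Int) := by rw [hfb]
        have hfb2 : (List.foldl (bVisit 0) (([] : List Int), Array.replicate 100001 0)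
            [start + 1, start - 1, start * 2]).2 = Array.replicate 100001 0 := by rw [hfb]
        rw [hfa1, hfa2, hfb1, hfb2, aLoop_nil]
        exact (bLoop_nil end_ (pvFuel - 1) 0 0 0 (Array.replicate 100001 0)).symm

@[simp] theorem bfs_raises : Claim_raises_bfs := by
  unfold Claim_raises_bfs
  constructor
  · intro start end_ _ hr hp
    unfold Raises_bfs at hr
    unfold Pre_bfs at hp
    rcases hp with ⟨h1, h2⟩
    rcases hr with h | ⟨he, h⟩
    · exact h1 h
    · rcases h2 he with ⟨ha, hb⟩; omega
  · refine ⟨by decide, by decide, ?_⟩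
    have h1 : pvRaiseWitness_bfs = (100001, 100001) := rfl
    have h2 : pvRaiseWitnessOut_bfs = [0, 1] := rfl
    rw [h1, h2]
    unfold bfs_alt
    have hsucc : pvFuel = (pvFuel - 1) + 1 := by norm_num [pvFuel]
    rw [hsucc, bLoop_cons, bNode_end 100001 0 100001 0 0 [] _ rfl]
    exact (bLoop_nil 100001 (pvFuel - 1) 0 (0 + 1) 0 (Array.replicate 100001 0)).trans
      (by norm_num)
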